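-- pv_equiv track=rewrite | github.com/Limseunghyun99/RasberryPi-Car-Project | past/Practice_1119.py | func
-- ===== SOURCE A (Python) =====
-- def func(n):
--     cnt = 0
--     while(True):
--         cnt += 1
--         n -= 1
--
--         if n<0 :
--             break
--
--     return cnt
-- ===== SOURCE B (Python) =====
-- def func(n):
--     # closed form: n+1 iterations for n >= 0, exactly one iteration otherwise
--     return n + 1 if n >= 0 else 1
-- ===== Notes on version B (the rewrite author's own statement) =====
-- stated objective: faster
-- what changed: replaced the decrement-until-negative loop by the closed form n+1 (for n>=0) / 1 (for n<0)
import Mathlib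
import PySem

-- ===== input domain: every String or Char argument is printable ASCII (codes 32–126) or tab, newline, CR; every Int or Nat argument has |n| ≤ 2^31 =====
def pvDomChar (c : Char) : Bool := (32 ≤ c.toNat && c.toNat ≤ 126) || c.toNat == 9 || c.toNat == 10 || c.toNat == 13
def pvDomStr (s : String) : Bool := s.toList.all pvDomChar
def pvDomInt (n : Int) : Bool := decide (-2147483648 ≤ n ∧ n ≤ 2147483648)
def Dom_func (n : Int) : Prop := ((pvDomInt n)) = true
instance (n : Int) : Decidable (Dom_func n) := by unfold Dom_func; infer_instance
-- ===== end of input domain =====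

-- B replaces A's decrement-until-negative loop by the closed form (faster: O(1) vs O(n)).

-- ===== PORT A =====
-- literal port of the while-True loop: cnt += 1; n -= 1; break when n < 0
def funcLoop (n cnt : Int) : Int :=
  if n - 1 < 0 then cnt + 1 else funcLoop (n - 1) (cnt + 1)
termination_by n.toNat
decreasing_by omega

def func (n : Int) : Int := funcLoop n 0

-- ===== PORT B =====
def func_alt (n : Int) : Int := if n ≥ 0 then n + 1 else 1

-- ===== PRECONDITION & SPEC =====
def Spec_func (n : Int) (out : Int) : Prop := out = func_alt n
instance (n : Int) (out : Int) : Decidable (Spec_func n out) := by unfold Spec_func; infer_instance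

-- ===== CLAIM (what is proved, stated in full; the proofs are below) =====
def Claim_equal_func : Prop := ∀ (n : Int), Dom_func n → Spec_func n (func n)

-- ===== LEMMAS AND PROOFS =====
theorem funcLoop_eq (n cnt : Int) : funcLoop n cnt = cnt + (if n ≥ 0 then n + 1 else 1) := by
  by_cases h : n - 1 < 0
  · rw [funcLoop.eq_def]
    simp only [h, if_true]
    split_ifs <;> omega
  · have hrec : funcLoop (n - 1) (cnt + 1) = (cnt + 1) + (if n - 1 ≥ 0 then (n - 1) + 1 else 1) :=
      funcLoop_eq (n - 1) (cnt + 1)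
    rw [funcLoop.eq_def]
    simp only [h, if_false, hrec]
    split_ifs <;> omega
termination_by n.toNat
decreasing_by omega

-- ===== VERDICT (by name: the statement is the Claim_ definition above) =====
theorem func_spec : Claim_equal_func := by
  intro n _
  unfold Spec_func func func_alt
  rw [funcLoop_eq]
  omega
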